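-- pv_equiv track=rewrite | github.com/amazon-ion/ion-hash-python | amazon/ionhash/hasher.py | _bytearray_comparator
-- ===== SOURCE A (Python) =====
-- def _bytearray_comparator(a, b):
--     a_len = a.__len__()
--     b_len = b.__len__()
--     i = 0
--     while i < a_len and i < b_len:
--         a_byte = a[i]
--         b_byte = b[i]
--         if a_byte != b_byte:
--             if a_byte - b_byte < 0:
--                 return -1
--             else:
--                 return 1
--         i += 1
--
--     len_diff = a_len - b_len
--     if len_diff < 0:
--         return -1
--     elif len_diff > 0:
--         return 1
--     else:
--         return 0
-- ===== SOURCE B (Python) =====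
-- def _bytearray_comparator(a, b):
--     ta, tb = list(a), list(b)
--     return (ta > tb) - (ta < tb)
-- ===== Notes on version B (the rewrite author's own statement) =====
-- stated objective: idiomatic
-- what changed: Replaces the explicit index loop and length-difference arithmetic with Python's built-in lexicographic sequence comparison, returning (a>b)-(a<b).
import Mathlib
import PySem

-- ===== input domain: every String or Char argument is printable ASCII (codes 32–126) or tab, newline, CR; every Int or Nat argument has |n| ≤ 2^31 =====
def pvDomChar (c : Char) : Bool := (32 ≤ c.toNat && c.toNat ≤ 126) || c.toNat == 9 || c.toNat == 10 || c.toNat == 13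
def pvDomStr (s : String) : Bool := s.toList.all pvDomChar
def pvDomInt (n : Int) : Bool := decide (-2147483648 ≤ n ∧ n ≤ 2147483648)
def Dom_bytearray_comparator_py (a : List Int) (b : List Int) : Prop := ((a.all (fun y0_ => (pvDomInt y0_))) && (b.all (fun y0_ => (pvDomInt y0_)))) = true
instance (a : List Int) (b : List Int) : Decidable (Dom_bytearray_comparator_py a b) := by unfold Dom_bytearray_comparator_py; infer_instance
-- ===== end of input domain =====

-- B replaces A's explicit index loop and length-difference arithmetic with a single
-- built-in lexicographic sequence comparison (idiomatic; same asymptotic cost).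
-- ===== PORT A =====
-- the while loop of A: each iteration consumes one element of each list; lenDiff = a_len - b_len computed upfront
def pvLoopA (lenDiff : Int) : List Int → List Int → Int
  | x :: xs, y :: ys =>
      if x ≠ y then (if x - y < 0 then -1 else 1) else pvLoopA lenDiff xs ys
  | _, _ => if lenDiff < 0 then -1 else if lenDiff > 0 then 1 else 0

def bytearray_comparator_py (a : List Int) (b : List Int) : Int :=
  pvLoopA ((a.length : Int) - (b.length : Int)) a b

-- ===== PORT B =====
-- Python's list '<' (lexicographic, shorter prefix is smaller)
def pyListLt : List Int → List Int → Bool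
  | _, [] => false
  | [], _ :: _ => true
  | x :: xs, y :: ys => if x < y then true else if y < x then false else pyListLt xs ys

def bytearray_comparator_py_alt (a : List Int) (b : List Int) : Int :=
  (if pyListLt b a then 1 else 0) - (if pyListLt a b then 1 else 0)

-- ===== PRECONDITION & SPEC =====
def Spec_bytearray_comparator_py (a : List Int) (b : List Int) (out : Int) : Prop := out = bytearray_comparator_py_alt a b
instance (a : List Int) (b : List Int) (out : Int) : Decidable (Spec_bytearray_comparator_py a b out) := by unfold Spec_bytearray_comparator_py; infer_instance

-- ===== CLAIM (what is proved, stated in full; the proofs are below) =====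
def Claim_equal_bytearray_comparator_py : Prop := ∀ (a : List Int) (b : List Int), Dom_bytearray_comparator_py a b → Spec_bytearray_comparator_py a b (bytearray_comparator_py a b)

-- ===== LEMMAS AND PROOFS =====
lemma pvLoopA_eq (a b : List Int) (d : Int)
    (hd : d = (a.length : Int) - (b.length : Int)) :
    pvLoopA d a b =
      (if pyListLt b a then 1 else 0) - (if pyListLt a b then 1 else 0) := by
  induction a generalizing b d with
  | nil =>
      cases b with
      | nil => simp [pvLoopA, pyListLt]; omega
      | cons y ys =>
          have : d < 0 := by simp at hd; omega
          simp [pvLoopA, pyListLt, this]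
  | cons x xs ih =>
      cases b with
      | nil =>
          have h1 : ¬ d < 0 := by simp at hd; omega
          have h2 : 0 < d := by simp at hd; omega
          simp [pvLoopA, pyListLt, h1, h2]
      | cons y ys =>
          simp only [pvLoopA, pyListLt]
          by_cases hxy : x = y
          · subst hxy
            simp only [ne_eq, not_true_eq_false, if_false, lt_irrefl]
            have := ih ys d (by simp at hd ⊢; omega)
            simpa using this
          · have hne : x ≠ y := hxy
            rcases lt_or_gt_of_ne hne with h | h
            · simp [hne, h, not_lt.mpr (le_of_lt h)]
            · simp [hne, h, not_lt.mpr (le_of_lt h)]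

-- ===== VERDICT (by name: the statement is the Claim_ definition above) =====
theorem bytearray_comparator_py_spec : Claim_equal_bytearray_comparator_py := by
  intro a b _
  unfold Spec_bytearray_comparator_py bytearray_comparator_py bytearray_comparator_py_alt
  exact pvLoopA_eq a b _ rfl
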